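-- pv_equiv track=rewrite | github.com/Rustymooz/NTC | NEW/File.py | fixEmptyCommas
-- ===== SOURCE A (Python) =====
-- def fixEmptyCommas(string):
--     # split the string char by char
--     components = []
--     components[0:] = string
--     # first base case (comma at the beginning of the components array)
--     if components[0] == ',':
--         components.insert(0, '*')
--     # last base case (comma at the end of the components array)
--     if components[-1] == ',':
--         components.append('*')
--     # all other cases
--     # iterate through the components array
--     index = 0
--     while index < len(components) - 1:
--         # check for two consecutive commas
--         if components[index] == ',' and components[index + 1] == ',':
--             # insert spacer
--             components.insert(index + 1, '*')
--         index += 1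
--     # return components as a string
--     return "".join(components)
-- ===== SOURCE B (Python) =====
-- def fixEmptyCommas(string):
--     # field-oriented: split on commas, replace empty fields with '*', re-join
--     return ','.join('*' if field == '' else field for field in string.split(','))
-- ===== Notes on version B (the rewrite author's own statement) =====
-- stated objective: simpler
-- what changed: A's char-by-char scan over a mutable list with positional inserts (plus two edge-case branches) is replaced by a one-line field transform: split the string on commas, map each empty field to a star, re-join.
-- outside the precondition, e.g. on fixEmptyCommas(''): A raises IndexError, B returns '*'
import Mathlib
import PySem

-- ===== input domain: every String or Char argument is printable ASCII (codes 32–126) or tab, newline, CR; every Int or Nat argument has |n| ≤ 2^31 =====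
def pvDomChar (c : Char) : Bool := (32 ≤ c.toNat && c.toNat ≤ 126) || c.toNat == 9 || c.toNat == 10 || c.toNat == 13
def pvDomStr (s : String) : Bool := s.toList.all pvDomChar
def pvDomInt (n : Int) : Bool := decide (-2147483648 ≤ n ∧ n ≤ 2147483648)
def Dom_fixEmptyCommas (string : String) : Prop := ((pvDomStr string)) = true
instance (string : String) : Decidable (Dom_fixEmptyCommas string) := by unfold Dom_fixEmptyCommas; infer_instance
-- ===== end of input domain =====

-- B replaces A's char-by-char scan with list inserts by a field transform (split on ',', map
-- empty fields to '*', re-join); equal return values on all non-empty strings (A raises on "").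

-- ===== PORT A =====
-- the while loop: state = (components, index); the fuel argument is a totality bound only
-- (index advances by 1 each iteration and each insert is immediately followed by a non-insert
-- step, so 2*len(components)+1 iterations always suffice; proved in pvALoop_spec below)
def pvALoop : Nat → List Char → Nat → List Char
  | 0, comps, _ => comps
  | fuel + 1, comps, index =>
    if index + 1 < comps.length then
      if PySem.List.pyGetD comps (index : Int) ' ' = ',' ∧
         PySem.List.pyGetD comps ((index : Int) + 1) ' ' = ',' then
        pvALoop fuel (PySem.List.insert comps ((index : Int) + 1) '*') (index + 1)
      else
        pvALoop fuel comps (index + 1)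
    else comps

def fixEmptyCommas (string : String) : String :=
  let components0 := string.toList
  let components1 :=
    if PySem.List.pyGetD components0 0 ' ' = ',' then PySem.List.insert components0 0 '*'
    else components0
  let components2 :=
    if PySem.List.pyGetD components1 (-1) ' ' = ',' then components1 ++ ['*']
    else components1
  String.ofList (pvALoop (2 * components2.length + 1) components2 0)

-- ===== PORT B =====
-- string.split(',') with a non-empty literal separator, ported through PySem.Chars.splitOn/join
def fixEmptyCommas_alt (string : String) : String :=
  String.ofList (PySem.Chars.join [',']
    ((PySem.Chars.splitOn string.toList [',']).map (fun field => if field = [] then ['*'] else field)))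

-- ===== PRECONDITION & SPEC =====
-- A evaluates components[0] of the char list of the string, so it raises IndexError on the
-- empty string, the only excluded input (B there returns "*": one empty field)
def Pre_fixEmptyCommas (string : String) : Prop := string ≠ ""
instance (string : String) : Decidable (Pre_fixEmptyCommas string) := by unfold Pre_fixEmptyCommas; infer_instance
def pvWitness_fixEmptyCommas : String := ",a,,b,"

def Spec_fixEmptyCommas (string : String) (out : String) : Prop := out = fixEmptyCommas_alt string
instance (string : String) (out : String) : Decidable (Spec_fixEmptyCommas string out) := by unfold Spec_fixEmptyCommas; infer_instance

-- ===== CLAIM (what is proved, stated in full; the proofs are below) =====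
def Claim_equal_fixEmptyCommas : Prop := ∀ (string : String), Dom_fixEmptyCommas string → Pre_fixEmptyCommas string → Spec_fixEmptyCommas string (fixEmptyCommas string)

-- ===== LEMMAS AND PROOFS =====

-- the result of A's while loop, structurally: a '*' between every adjacent pair of commas
def pvIns : List Char → List Char
  | ',' :: ',' :: rest => ',' :: '*' :: pvIns (',' :: rest)
  | c :: rest => c :: pvIns rest
  | [] => []

-- a single left-to-right description both programs are reduced to;
-- state true = at the start of a field (string start or just after a comma)
def pvRun : Bool → List Char → List Char
  | true, [] => ['*']
  | false, [] => []
  | atStart, c :: r =>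
      if c = ',' then (if atStart then '*' :: ',' :: pvRun true r else ',' :: pvRun true r)
      else c :: pvRun false r

-- A's trailing-edge fix as an append
def pvTail (l : List Char) : List Char := l ++ (if l.getLast? = some ',' then ['*'] else [])

theorem pvInsert_natCast (l : List Char) (n : Nat) :
    PySem.List.insert l (n : Int) '*' = l.take n ++ '*' :: l.drop n := by
  simp [PySem.List.insert, PySem.List.sliceIndices]
  rw [if_neg (by omega : ¬ ((n:Int) < 0))]
  have h : ((min (n:Int) (l.length:Int))).toNat = min n l.length := by omega
  rw [h]
  rcases le_total n l.length with hle | hle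
  · rw [min_eq_left hle]
  · rw [min_eq_right hle]; simp [List.drop_of_length_le hle, List.take_of_length_le hle]

theorem pvInsert_zero (l : List Char) : PySem.List.insert l 0 '*' = '*' :: l := by
  simpa using pvInsert_natCast l 0

theorem pvGetD_mid (pre rest : List Char) (a : Char) :
    PySem.List.pyGetD (pre ++ a :: rest) ((pre.length : Int)) ' ' = a := by
  rw [PySem.List.pyGetD_natCast, List.getD_eq_getElem?_getD, List.getElem?_append_right (by omega)]
  simp

theorem pvGetD_mid1 (pre rest : List Char) (a b : Char) :
    PySem.List.pyGetD (pre ++ a :: b :: rest) ((pre.length : Int) + 1) ' ' = b := by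
  have h : ((pre.length : Int) + 1) = ((pre.length + 1 : Nat) : Int) := by push_cast; ring
  rw [h, PySem.List.pyGetD_natCast, List.getD_eq_getElem?_getD, List.getElem?_append_right (by omega)]
  simp

theorem pvIns_cons (a : Char) (l : List Char) (h : ¬ (a = ',' ∧ l.head? = some ',')) :
    pvIns (a :: l) = a :: pvIns l := by
  match a, l with
  | a, [] => by_cases ha : a = ','
             · subst ha; rfl
             · simp [pvIns]
  | a, b :: r =>
    by_cases ha : a = ','
    · have hb : b ≠ ',' := by intro hb; exact h ⟨ha, by simp [hb]⟩
      subst ha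
      simp [pvIns, hb]
    · simp [pvIns, ha]

theorem pvInsert_mid (pre rest : List Char) (a : Char) :
    PySem.List.insert (pre ++ a :: rest) ((pre.length : Int) + 1) '*'
      = pre ++ a :: '*' :: rest := by
  have h : ((pre.length : Int) + 1) = ((pre.length + 1 : Nat) : Int) := by push_cast; ring
  rw [h, pvInsert_natCast]
  have t1 : (pre ++ a :: rest).take (pre.length + 1) = pre ++ (a :: rest).take 1 :=
    List.take_length_add_append 1
  have t2 : (pre ++ a :: rest).drop (pre.length + 1) = (a :: rest).drop 1 :=
    List.drop_length_add_append 1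
  rw [t1, t2]; simp

theorem pvALoop_spec : ∀ (todo pre : List Char) (fuel : Nat), 2 * todo.length ≤ fuel →
    pvALoop fuel (pre ++ todo) pre.length = pre ++ pvIns todo
  | [], pre, fuel, _ => by
    cases fuel <;> simp [pvALoop, pvIns]
  | [a], pre, fuel, _ => by
    cases fuel <;> simp [pvALoop, pvIns_cons a [] (by simp), show pvIns [] = [] from rfl]
  | a :: b :: rest, pre, fuel, hf => by
    have hn : 4 ≤ fuel := by simp at hf; omega
    obtain ⟨f, rfl⟩ : ∃ f, fuel = f + 1 := ⟨fuel - 1, by omega⟩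
    rw [pvALoop]
    rw [if_pos (by simp only [List.length_append, List.length_cons]; omega)]
    rw [pvGetD_mid, pvGetD_mid1]
    by_cases hab : a = ',' ∧ b = ','
    · rw [if_pos hab, pvInsert_mid]
      obtain ⟨g, rfl⟩ : ∃ g, f = g + 1 := ⟨f - 1, by omega⟩
      rw [pvALoop]
      rw [if_pos (by simp only [List.length_append, List.length_cons]; omega)]
      have e1 : pre ++ a :: '*' :: b :: rest = (pre ++ [a]) ++ '*' :: b :: rest := by simp
      have hidx : pre.length + 1 = (pre ++ [a]).length := by simp
      rw [e1, hidx, pvGetD_mid]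
      rw [if_neg (by simp)]
      have e2 : (pre ++ [a]) ++ '*' :: b :: rest = (pre ++ [a, '*']) ++ b :: rest := by simp
      have hidx2 : (pre ++ [a]).length + 1 = (pre ++ [a, '*']).length := by simp
      rw [e2, hidx2, pvALoop_spec (b :: rest) (pre ++ [a, '*']) g (by simp at hf ⊢; omega)]
      obtain ⟨ha, hb⟩ := hab; subst ha; subst hb
      simp [pvIns]
    · rw [if_neg hab]
      have e1 : pre ++ a :: b :: rest = (pre ++ [a]) ++ b :: rest := by simp
      have hidx : pre.length + 1 = (pre ++ [a]).length := by simp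
      rw [e1, hidx, pvALoop_spec (b :: rest) (pre ++ [a]) f (by simp at hf ⊢; omega)]
      rw [pvIns_cons a (b :: rest) (by simp; intro ha hb; exact hab ⟨ha, hb⟩)]
      simp

theorem pvTail_cons (x : Char) (l : List Char) (h : l ≠ []) :
    pvTail (x :: l) = x :: pvTail l := by
  cases l with
  | nil => exact absurd rfl h
  | cons y ys => simp [pvTail, List.getLast?_cons_cons]

theorem pvIns_pvTail : ∀ (l : List Char), l ≠ [] → pvIns (pvTail l) = pvRun false l
  | [], h => absurd rfl h
  | [c], _ => by
    by_cases hc : c = ','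
    · subst hc; rfl
    · simp [pvTail, hc, pvIns_cons c [] (by simp), pvRun, show pvIns [] = [] from rfl]
  | a :: b :: r, _ => by
    rw [pvTail_cons a (b :: r) (by simp)]
    by_cases hab : a = ',' ∧ b = ','
    · obtain ⟨ha, hb⟩ := hab; subst ha; subst hb
      obtain ⟨X, hX⟩ : ∃ X, pvTail (',' :: r) = ',' :: X := by
        cases r with
        | nil => exact ⟨['*'], rfl⟩
        | cons y ys => exact ⟨pvTail (y :: ys), by simp [pvTail]⟩
      rw [hX]
      show ',' :: '*' :: pvIns (',' :: X) = pvRun false (',' :: ',' :: r)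
      rw [← hX, pvIns_pvTail (',' :: r) (by simp)]
      rfl
    · rw [pvIns_cons a (pvTail (b :: r)) (by
        intro ⟨ha, hb⟩
        have : (pvTail (b :: r)).head? = some b := by
          by_cases hr : r = []
          · subst hr; by_cases hbc : b = ',' <;> simp [pvTail, hbc]
          · simp [pvTail]
        rw [this] at hb
        exact hab ⟨ha, by injection hb⟩)]
      rw [pvIns_pvTail (b :: r) (by simp)]
      by_cases ha : a = ','
      · subst ha
        have hb : b ≠ ',' := fun hb => hab ⟨rfl, hb⟩
        simp [pvRun, hb]
      · simp [pvRun, ha]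

-- the fields of string.split(',') described structurally
def pvFields : List Char → List (List Char)
  | [] => [[]]
  | ',' :: r => [] :: pvFields r
  | c :: r => (pvFields r).modifyHead (c :: ·)

theorem pvFields_exists : ∀ (l : List Char), ∃ p ps, pvFields l = p :: ps
  | [] => ⟨[], [], rfl⟩
  | ',' :: r => ⟨[], pvFields r, rfl⟩
  | c :: r => by
    by_cases hc : c = ','
    · subst hc; exact ⟨[], pvFields r, rfl⟩
    · obtain ⟨p, ps, hps⟩ := pvFields_exists r
      exact ⟨c :: p, ps, by simp [pvFields, hps]⟩

theorem pvGo_spec : ∀ (fuel : Nat) (l cur : List Char) (acc : List (List Char)),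
    l.length < fuel →
    PySem.Chars.splitOn.go [','] fuel l cur acc
      = acc.reverse ++ (pvFields l).modifyHead (cur.reverse ++ ·)
  | fuel + 1, [], cur, acc, _ => by
    simp [PySem.Chars.splitOn.go, pvFields]
  | fuel + 1, c :: r, cur, acc, h => by
    by_cases hc : c = ','
    · subst hc
      rw [show PySem.Chars.splitOn.go [','] (fuel+1) (',' :: r) cur acc
            = PySem.Chars.splitOn.go [','] fuel r [] (cur.reverse :: acc) by
          simp [PySem.Chars.splitOn.go, List.isPrefixOf]]
      rw [pvGo_spec fuel r [] (cur.reverse :: acc) (by simpa using h)]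
      obtain ⟨p, ps, hps⟩ := pvFields_exists r
      simp [pvFields, hps]
    · rw [show PySem.Chars.splitOn.go [','] (fuel+1) (c :: r) cur acc
            = PySem.Chars.splitOn.go [','] fuel r (c :: cur) acc by
          simp [PySem.Chars.splitOn.go, List.isPrefixOf, Ne.symm hc]]
      rw [pvGo_spec fuel r (c :: cur) acc (by simpa using h)]
      obtain ⟨p, ps, hps⟩ := pvFields_exists r
      simp [pvFields, hps]

theorem pvSplitOn_eq (l : List Char) : PySem.Chars.splitOn l [','] = pvFields l := by
  rw [PySem.Chars.splitOn, pvGo_spec (l.length + 1) l [] [] (by omega)]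
  obtain ⟨p, ps, hps⟩ := pvFields_exists l
  simp [hps]

theorem pvJoin_cons_field (c : Char) (p : List Char) (rest : List (List Char)) :
    PySem.Chars.join [','] ((c :: p) :: rest) = c :: PySem.Chars.join [','] (p :: rest) := by
  cases rest with
  | nil => rw [PySem.Chars.join_singleton, PySem.Chars.join_singleton]
  | cons q qs => rw [PySem.Chars.join_cons_cons, PySem.Chars.join_cons_cons]; simp

def pvFix (f : List Char) : List Char := if f = [] then ['*'] else f

def pvMapTail : List (List Char) → List (List Char)
  | [] => []
  | x :: xs => x :: xs.map pvFix

theorem pvJoin_run : ∀ (l : List Char),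
    PySem.Chars.join [','] ((pvFields l).map pvFix) = pvRun true l
    ∧ PySem.Chars.join [','] (pvMapTail (pvFields l)) = pvRun false l
  | [] => by
    constructor <;> simp [pvFields, pvMapTail, pvFix, PySem.Chars.join_singleton, pvRun]
  | c :: r => by
    have IH := pvJoin_run r
    obtain ⟨p, ps, hps⟩ := pvFields_exists r
    by_cases hc : c = ','
    · subst hc
      constructor
      · show PySem.Chars.join [','] (([] :: pvFields r).map pvFix) = pvRun true (',' :: r)
        rw [show ([] :: pvFields r).map pvFix = ['*'] :: (pvFields r).map pvFix by simp [pvFix]]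
        rw [hps, List.map_cons, PySem.Chars.join_cons_cons, ← List.map_cons, ← hps, IH.1]
        simp [pvRun]
      · show PySem.Chars.join [','] (pvMapTail ([] :: pvFields r)) = pvRun false (',' :: r)
        rw [show pvMapTail ([] :: pvFields r) = [] :: (pvFields r).map pvFix from rfl]
        rw [hps, List.map_cons, PySem.Chars.join_cons_cons, ← List.map_cons, ← hps, IH.1]
        simp [pvRun]
    · have hF : pvFields (c :: r) = (c :: p) :: ps := by simp [pvFields, hps]
      have key : PySem.Chars.join [','] (((c :: p) :: ps).map pvFix)
          = c :: pvRun false r := by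
        rw [List.map_cons, show pvFix (c :: p) = c :: p from by simp [pvFix]]
        rw [pvJoin_cons_field]
        rw [show (p :: ps.map pvFix) = pvMapTail (p :: ps) from rfl, ← hps, IH.2]
      constructor
      · rw [hF, key]; simp [pvRun, hc]
      · rw [hF, show pvMapTail ((c :: p) :: ps) = ((c::p) :: ps.map pvFix) from rfl]
        rw [show ((c::p) :: ps.map pvFix) = ((c :: p) :: ps).map pvFix from by
              simp [pvFix]]
        rw [key]; simp [pvRun, hc]

-- A's ,[-1] test followed by the append is exactly pvTail, for a non-empty list
theorem pvTailIf_eq (l : List Char) (h : l ≠ []) :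
    (if PySem.List.pyGetD l (-1) ' ' = ',' then l ++ ['*'] else l) = pvTail l := by
  unfold pvTail
  rw [PySem.List.pyGetD_neg_one l ' ' h, List.getLast?_eq_some_getLast h]
  split_ifs with h1 h2 h3 <;> simp_all

-- the whole of A, for a non-empty input, equals pvRun true
theorem pvA_run (l : List Char) (h : l ≠ []) :
    (let components1 :=
        if PySem.List.pyGetD l 0 ' ' = ',' then PySem.List.insert l 0 '*' else l
      let components2 :=
        if PySem.List.pyGetD components1 (-1) ' ' = ',' then components1 ++ ['*'] else components1
      pvALoop (2 * components2.length + 1) components2 0) = pvRun true l := by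
  obtain ⟨c, r, rfl⟩ : ∃ c r, l = c :: r := by
    cases l with
    | nil => exact absurd rfl h
    | cons c r => exact ⟨c, r, rfl⟩
  simp only [PySem.List.pyGetD_zero_cons]
  by_cases hc : c = ','
  · subst hc
    rw [if_pos rfl, pvInsert_zero, pvTailIf_eq ('*' :: ',' :: r) (by simp)]
    rw [show pvALoop (2 * (pvTail ('*' :: ',' :: r)).length + 1) (pvTail ('*' :: ',' :: r)) 0
          = pvALoop (2 * (pvTail ('*' :: ',' :: r)).length + 1)
              ([] ++ pvTail ('*' :: ',' :: r)) ([] : List Char).length by simp]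
    rw [pvALoop_spec (pvTail ('*' :: ',' :: r)) [] _ (by omega)]
    rw [pvTail_cons '*' (',' :: r) (by simp)]
    rw [pvIns_cons '*' (pvTail (',' :: r)) (by simp)]
    rw [pvIns_pvTail (',' :: r) (by simp)]
    simp [pvRun]
  · rw [if_neg hc, pvTailIf_eq (c :: r) (by simp)]
    rw [show pvALoop (2 * (pvTail (c :: r)).length + 1) (pvTail (c :: r)) 0
          = pvALoop (2 * (pvTail (c :: r)).length + 1)
              ([] ++ pvTail (c :: r)) ([] : List Char).length by simp]
    rw [pvALoop_spec (pvTail (c :: r)) [] _ (by omega)]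
    rw [pvIns_pvTail (c :: r) (by simp)]
    simp [pvRun, hc]

-- ===== VERDICT (by name: the statement is the Claim_ definition above) =====
theorem fixEmptyCommas_spec : Claim_equal_fixEmptyCommas := by
  unfold Claim_equal_fixEmptyCommas
  intro s _ hpre
  unfold Spec_fixEmptyCommas fixEmptyCommas fixEmptyCommas_alt
  have hl : s.toList ≠ [] := by
    intro h
    exact hpre (by simpa using congrArg String.ofList h)
  have hA : (let components0 := s.toList
      let components1 :=
        if PySem.List.pyGetD components0 0 ' ' = ',' then PySem.List.insert components0 0 '*'
        else components0
      let components2 :=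
        if PySem.List.pyGetD components1 (-1) ' ' = ',' then components1 ++ ['*'] else components1
      String.ofList (pvALoop (2 * components2.length + 1) components2 0))
      = String.ofList (pvRun true s.toList) :=
    congrArg String.ofList (pvA_run s.toList hl)
  rw [hA, pvSplitOn_eq]
  rw [show (fun field => if field = ([] : List Char) then ['*'] else field) = pvFix from rfl]
  rw [(pvJoin_run s.toList).1]
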